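-- pv_equiv track=rewrite | github.com/chappiewuzefan/zefan-site | skills/resume-impact-tailor/scripts/resume_signal_report.py | strip_tex_comments
-- ===== SOURCE A (Python) =====
-- def strip_tex_comments(text: str) -> str:
--     cleaned_lines: list[str] = []
--     for line in text.splitlines():
--         if line.lstrip().startswith("%"):
--             continue
--         chars: list[str] = []
--         i = 0
--         while i < len(line):
--             ch = line[i]
--             if ch == "%" and (i == 0 or line[i - 1] != "\\"):
--                 break
--             chars.append(ch)
--             i += 1
--         cleaned_lines.append("".join(chars))
--     return "\n".join(cleaned_lines)
-- ===== SOURCE B (Python) =====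
-- def strip_tex_comments(text: str) -> str:
--     def uncomment(line: str) -> str:
--         # split on '%' and re-attach pieces while the cut point was escaped by a backslash
--         parts = line.split('%')
--         kept = parts[0]
--         j = 1
--         while j < len(parts) and kept.endswith('\\'):
--             kept += '%' + parts[j]
--             j += 1
--         return kept
--     return '\n'.join(
--         uncomment(line)
--         for line in text.splitlines()
--         if not line.lstrip().startswith('%')
--     )
-- ===== Notes on version B (the rewrite author's own statement) =====
-- stated objective: faster
-- what changed: Per line, instead of A's char-by-char index loop with a look-back at the previous character, B splits the line on the percent character and re-joins the leading pieces while the piece before the cut ends in a backslash, then builds the output with a filter/comprehension over splitlines.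
import Mathlib
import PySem

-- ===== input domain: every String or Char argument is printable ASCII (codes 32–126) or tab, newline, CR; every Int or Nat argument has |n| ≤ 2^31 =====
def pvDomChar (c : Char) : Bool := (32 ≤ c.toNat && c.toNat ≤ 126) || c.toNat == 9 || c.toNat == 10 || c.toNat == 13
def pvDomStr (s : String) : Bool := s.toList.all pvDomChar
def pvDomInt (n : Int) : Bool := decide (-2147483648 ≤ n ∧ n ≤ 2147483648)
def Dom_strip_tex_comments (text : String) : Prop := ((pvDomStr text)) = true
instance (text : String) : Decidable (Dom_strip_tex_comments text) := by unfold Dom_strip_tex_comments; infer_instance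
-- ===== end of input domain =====

-- B strips TeX comments by splitting each line on '%' and re-joining escaped cuts, instead of A's indexed character loop (measured faster: C-level str.split replaces a per-character Python loop).

-- ===== PORT A =====
-- the 'while i < len(line)' loop: chars accumulator, index i, look-back at line[i-1]
def pvALoop (cs : List Char) (chars : List Char) (i : Nat) : List Char :=
  if h : i < cs.length then
    let ch := cs[i]
    if ch = '%' ∧ (i = 0 ∨ cs[i-1]! ≠ '\\') then chars
    else pvALoop cs (chars ++ [ch]) (i + 1)
  else chars
termination_by cs.length - i

def strip_tex_comments (text : String) : String :=
  let cleaned : List String := (PySem.Str.splitlines text).foldl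
    (fun acc line =>
      if PySem.Str.startswith (PySem.Str.lstrip line) "%" then acc
      else acc ++ [String.ofList (pvALoop line.toList [] 0)]) []
  PySem.Str.join "\n" cleaned

-- ===== PORT B =====
-- the 'while j < len(parts) and kept.endswith("\\")' re-join loop
def pvBRejoin (kept : List Char) (parts : List (List Char)) : List Char :=
  match parts with
  | [] => kept
  | p :: ps =>
    if PySem.Chars.endswith kept ['\\'] then pvBRejoin (kept ++ '%' :: p) ps else kept

def pvBLine (line : List Char) : List Char :=
  match PySem.Chars.splitOn line ['%'] with
  | [] => []         -- unreachable: split never returns an empty list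
  | p :: ps => pvBRejoin p ps

def strip_tex_comments_alt (text : String) : String :=
  PySem.Str.join "\n"
    (((PySem.Str.splitlines text).filter
        (fun line => !(PySem.Str.startswith (PySem.Str.lstrip line) "%"))).map
      (fun line => String.ofList (pvBLine line.toList)))

-- ===== PRECONDITION & SPEC =====
def Spec_strip_tex_comments (text : String) (out : String) : Prop := out = strip_tex_comments_alt text
instance (text : String) (out : String) : Decidable (Spec_strip_tex_comments text out) := by unfold Spec_strip_tex_comments; infer_instance

-- ===== CLAIM (what is proved, stated in full; the proofs are below) =====
def Claim_equal_strip_tex_comments : Prop := ∀ (text : String), Dom_strip_tex_comments text → Spec_strip_tex_comments text (strip_tex_comments text)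

-- ===== LEMMAS AND PROOFS =====

-- common characterisation: the kept prefix of a line, given the previous character
def pvCut (prev : Option Char) : List Char → List Char
  | [] => []
  | c :: cs => if c = '%' ∧ prev ≠ some '\\' then [] else c :: pvCut (some c) cs

-- structural form of line.split('%')
def pvSplit : List Char → List (List Char)
  | [] => [[]]
  | c :: cs =>
    if c = '%' then [] :: pvSplit cs
    else match pvSplit cs with
      | [] => [[c]]
      | p :: ps => (c :: p) :: ps

theorem pvSplit_ne_nil (cs : List Char) : pvSplit cs ≠ [] := by
  induction cs with
  | nil => simp [pvSplit]
  | cons c cs ih =>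
    simp only [pvSplit]
    split
    · simp
    · cases h : pvSplit cs <;> simp

theorem splitOn_go_eq (fuel : Nat) :
    ∀ (l cur : List Char) (acc : List (List Char)), l.length < fuel →
      PySem.Chars.splitOn.go ['%'] fuel l cur acc
        = acc.reverse ++ (pvSplit l).modifyHead (cur.reverse ++ ·) := by
  induction fuel with
  | zero => intro l cur acc h; omega
  | succ fuel ih =>
    intro l cur acc h
    cases l with
    | nil =>
      simp [PySem.Chars.splitOn.go, pvSplit]
    | cons c rest =>
      by_cases hc : c = '%'
      · subst hc
        rw [PySem.Chars.splitOn.go]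
        simp only [List.isPrefixOf, beq_self_eq_true, Bool.true_and, if_pos]
        simp only [List.length_singleton, List.drop_succ_cons, List.drop_zero]
        rw [ih rest [] (cur.reverse :: acc) (by simpa using Nat.lt_of_succ_lt_succ h)]
        simp [pvSplit]
        cases hs : pvSplit rest with
        | nil => exact absurd hs (pvSplit_ne_nil rest)
        | cons p ps => simp
      · rw [PySem.Chars.splitOn.go]
        have : List.isPrefixOf ['%'] (c :: rest) = false := by
          simp [List.isPrefixOf]
          exact fun hcc => hc (by simpa using hcc.symm)
        rw [if_neg (by simp [this])]
        rw [ih rest (c :: cur) acc (by simpa using Nat.lt_of_succ_lt_succ h)]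
        simp only [pvSplit, if_neg hc]
        cases hs : pvSplit rest with
        | nil => exact absurd hs (pvSplit_ne_nil rest)
        | cons p ps => simp

theorem splitOn_eq (cs : List Char) : PySem.Chars.splitOn cs ['%'] = pvSplit cs := by
  unfold PySem.Chars.splitOn
  rw [splitOn_go_eq (cs.length + 1) cs [] [] (by omega)]
  cases hs : pvSplit cs with
  | nil => exact absurd hs (pvSplit_ne_nil cs)
  | cons p ps => simp

theorem endswith_backslash (kept : List Char) :
    PySem.Chars.endswith kept ['\\'] = true ↔ kept.getLast? = some '\\' := by
  rw [PySem.Chars.endswith_iff]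
  constructor
  · rintro ⟨t, rfl⟩; simp
  · intro hg
    obtain ⟨l', rfl⟩ := List.getLast?_eq_some_iff.mp hg
    exact ⟨l', rfl⟩

theorem rejoin_eq : ∀ (cs : List Char) (acc p : List Char) (ps : List (List Char)),
    pvSplit cs = p :: ps → pvBRejoin (acc ++ p) ps = acc ++ pvCut acc.getLast? cs := by
  intro cs
  induction cs with
  | nil =>
    intro acc p ps hs
    simp [pvSplit] at hs
    obtain ⟨rfl, rfl⟩ := hs
    simp [pvBRejoin, pvCut]
  | cons c rest ih =>
    intro acc p ps hs
    by_cases hc : c = '%'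
    · subst hc
      simp only [pvSplit, if_pos] at hs
      obtain ⟨rfl, rfl⟩ := List.cons.inj hs
      cases hr : pvSplit rest with
      | nil => exact absurd hr (pvSplit_ne_nil rest)
      | cons p0 ps0 =>
        simp only [List.append_nil, pvBRejoin]
        by_cases hbk : acc.getLast? = some '\\'
        · rw [if_pos ((endswith_backslash acc).mpr hbk)]
          have := ih (acc ++ ['%']) p0 ps0 hr
          simp only [List.getLast?_append, List.getLast?_singleton] at this
          rw [List.append_assoc] at this
          simp only [List.singleton_append] at this
          rw [this]
          simp [pvCut, hbk, List.append_assoc]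
        · rw [if_neg (by simp [endswith_backslash, hbk])]
          simp [pvCut, hbk]
    · simp only [pvSplit, if_neg hc] at hs
      cases hr : pvSplit rest with
      | nil => exact absurd hr (pvSplit_ne_nil rest)
      | cons p0 ps0 =>
        rw [hr] at hs
        obtain ⟨rfl, rfl⟩ := List.cons.inj hs
        have := ih (acc ++ [c]) p0 ps0 hr
        simp only [List.getLast?_append, List.getLast?_singleton] at this
        rw [List.append_assoc] at this
        simp only [List.singleton_append] at this
        rw [this]
        simp [pvCut, hc, List.append_assoc]

theorem bLine_eq_cut (cs : List Char) : pvBLine cs = pvCut none cs := by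
  unfold pvBLine
  rw [splitOn_eq]
  cases hs : pvSplit cs with
  | nil => exact absurd hs (pvSplit_ne_nil cs)
  | cons p ps =>
    have := rejoin_eq cs [] p ps hs
    simpa using this

theorem aLoop_eq (cs : List Char) : ∀ (i : Nat) (acc : List Char), i ≤ cs.length →
    pvALoop cs acc i = acc ++ pvCut (if i = 0 then none else some cs[i-1]!) (cs.drop i) := by
  intro i
  induction hn : cs.length - i using Nat.strong_induction_on generalizing i with
  | _ n ihn =>
    intro acc hi
    by_cases h : i < cs.length
    · rw [pvALoop, dif_pos h]
      rw [List.drop_eq_getElem_cons h]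
      by_cases hcond : cs[i] = '%' ∧ (i = 0 ∨ cs[i-1]! ≠ '\\')
      · rw [if_pos hcond]
        have hne : (if i = 0 then (none : Option Char) else some cs[i-1]!) ≠ some '\\' := by
          rcases hcond.2 with h0 | hne
          · simp [h0]
          · split
            · simp
            · exact fun hcc => hne (Option.some.inj hcc)
        have hz : pvCut (if i = 0 then none else some cs[i-1]!) (cs[i] :: cs.drop (i+1)) = [] := by
          rw [pvCut, if_pos ⟨hcond.1, hne⟩]
        rw [hz, List.append_nil]
      · rw [if_neg hcond]
        have hrec := ihn (cs.length - (i+1)) (by omega) (i+1) rfl (acc ++ [cs[i]]) (by omega)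
        have hidx : (if i + 1 = 0 then (none : Option Char) else some cs[i+1-1]!) = some cs[i] := by
          rw [if_neg (by omega)]
          have h1 : i + 1 - 1 = i := rfl
          rw [h1, getElem!_pos cs i h]
        rw [hidx] at hrec
        rw [hrec, List.append_assoc]
        congr 1
        have hc2 : ¬ (cs[i] = '%' ∧ (if i = 0 then (none : Option Char) else some cs[i-1]!) ≠ some '\\') := by
          intro ⟨h1, h2⟩
          apply hcond
          refine ⟨h1, ?_⟩
          by_cases h0 : i = 0
          · exact Or.inl h0
          · rw [if_neg h0] at h2
            exact Or.inr (fun he => h2 (by rw [he]))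
        rw [pvCut, if_neg hc2]
        simp
    · rw [pvALoop, dif_neg h]
      have hd : cs.drop i = [] := List.drop_eq_nil_of_le (by omega)
      simp [hd, pvCut]

theorem line_eq (line : String) :
    String.ofList (pvALoop line.toList [] 0) = String.ofList (pvBLine line.toList) := by
  rw [bLine_eq_cut, aLoop_eq line.toList 0 [] (by omega)]
  simp

-- ===== VERDICT (by name: the statement is the Claim_ definition above) =====
theorem strip_tex_comments_spec : Claim_equal_strip_tex_comments := by
  intro text _
  unfold Spec_strip_tex_comments strip_tex_comments strip_tex_comments_alt
  have hfun : (fun (acc : List String) (line : String) =>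
      if PySem.Str.startswith (PySem.Str.lstrip line) "%" then acc
      else acc ++ [String.ofList (pvALoop line.toList [] 0)])
    = (fun acc line =>
      if (!(PySem.Str.startswith (PySem.Str.lstrip line) "%")) = true
      then acc ++ [String.ofList (pvALoop line.toList [] 0)] else acc) := by
    funext acc line
    cases PySem.Str.startswith (PySem.Str.lstrip line) "%" <;> simp
  simp only [hfun]
  rw [PySem.List.foldl_append_if]
  simp only [List.nil_append]
  congr 1
  apply List.map_congr_left
  intro line _
  exact line_eq line
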